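-- pv_equiv track=rewrite | github.com/yasaminaali/AI-in-3D-Printing | src/model/constructive.py | _spread_indices
-- ===== SOURCE A (Python) =====
-- def _spread_indices(n):
--     """Return indices 0..n-1 reordered so early elements span the full range.
--
--     Uses recursive midpoint insertion: first/last, then midpoint, then
--     quarter-points, etc. Ensures that any prefix of the result covers the
--     range as evenly as possible.
--
--     Example for n=8: [0, 7, 3, 1, 5, 2, 4, 6]
--     """
--     if n <= 0:
--         return []
--     if n == 1:
--         return [0]
--
--     result = []
--     added = [False] * n
--
--     def _add(idx):
--         if 0 <= idx < n and not added[idx]: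
--             result.append(idx)
--             added[idx] = True
--
--     _add(0)
--     _add(n - 1)
--
--     intervals = [(0, n - 1)]
--     while len(result) < n:
--         next_intervals = []
--         for lo, hi in intervals:
--             if hi - lo <= 1:
--                 continue
--             mid = (lo + hi) // 2
--             _add(mid)
--             next_intervals.append((lo, mid))
--             next_intervals.append((mid, hi))
--         if not next_intervals:
--             break
--         intervals = next_intervals
--
--     return result
-- ===== SOURCE B (Python) =====
-- def _spread_indices(n):
--     """Iterative-deepening variant: recompute the midpoints of each recursion
--     level directly by a depth-limited recursion and write them into a
--     preallocated output after [0, n-1]; no interval queue, no `added` array."""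
--     if n <= 0:
--         return []
--     if n == 1:
--         return [0]
--
--     def _layer(lo, hi, k):
--         if hi - lo < 2:
--             return []
--         if k == 0:
--             return [(lo + hi) // 2]
--         mid = (lo + hi) // 2
--         return _layer(lo, mid, k - 1) + _layer(mid, hi, k - 1)
--
--     out = [0] * n
--     out[1] = n - 1
--     i = 2
--     k = 0
--     while i < n:
--         for m in _layer(0, n - 1, k):
--             out[i] = m
--             i += 1
--         k += 1
--     return out
-- ===== Notes on version B (the rewrite author's own statement) =====
-- stated objective: alternative
-- what changed: Replaces A's breadth-first level-by-level interval queue with its `added` bookkeeping array and `len(result)` stopping test by an iterative-deepening scheme: each level's midpoints are recomputed directly by a depth-limited recursion and written into a preallocated output after [0, n-1].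
import Mathlib
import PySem

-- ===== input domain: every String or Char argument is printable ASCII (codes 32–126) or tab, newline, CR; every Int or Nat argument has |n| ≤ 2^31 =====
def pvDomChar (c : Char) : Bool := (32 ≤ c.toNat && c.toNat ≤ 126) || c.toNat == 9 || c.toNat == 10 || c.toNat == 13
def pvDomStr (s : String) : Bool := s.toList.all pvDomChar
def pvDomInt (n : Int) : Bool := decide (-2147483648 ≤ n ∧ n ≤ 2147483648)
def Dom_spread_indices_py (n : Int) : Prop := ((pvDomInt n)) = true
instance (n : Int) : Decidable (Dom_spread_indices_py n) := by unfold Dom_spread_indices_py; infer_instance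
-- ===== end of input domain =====

-- B recomputes each recursion level's midpoints directly by a depth-limited recursion
-- and writes them into a preallocated output, instead of A's breadth-first interval
-- queue with an `added` bookkeeping array (objective: alternative algorithm, similar cost).

-- shared arithmetic helper: Python's (lo + hi) // 2
def pvMid (lo hi : Int) : Int := PySem.Int.floordiv (lo + hi) 2

-- midpoint of an interval of width ≥ 2 is strictly interior (used by pvLayer's termination)
theorem pv_mid_bounds (lo hi : Int) (h : 2 ≤ hi - lo) :
    lo + 1 ≤ pvMid lo hi ∧ pvMid lo hi + 1 ≤ hi := by
  have h1 : pvMid lo hi = (lo + hi) / 2 := by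
    unfold pvMid PySem.Int.floordiv
    rw [Int.fdiv_eq_ediv]
    simp
  omega

-- ===== PORT A =====
-- `_add(idx)`: the guard `0 <= idx < n and not added[idx]`; the index is in range when
-- `added[idx]` is read, so Lean's List.getD/List.set are exact here.
def pvAdd (n idx : Int) (res : List Int) (added : List Bool) : List Int × List Bool :=
  if 0 ≤ idx ∧ idx < n ∧ added.getD idx.toNat true = false then
    (res ++ [idx], added.set idx.toNat true)
  else (res, added)

-- body of `for lo, hi in intervals`, state = (result, added, next_intervals)
def pvStep (n : Int) (st : List Int × List Bool × List (Int × Int)) (iv : Int × Int) :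
    List Int × List Bool × List (Int × Int) :=
  if iv.2 - iv.1 ≤ 1 then st
  else
    let m := pvMid iv.1 iv.2
    let ra := pvAdd n m st.1 st.2.1
    (ra.1, ra.2, st.2.2 ++ [(iv.1, m), (m, iv.2)])

-- the `while len(result) < n` loop; fuel n.toNat is spent one unit per level and is
-- proved sufficient (lemma pv_loop_eq below covers all reachable states)
def pvLoop (n : Int) : Nat → List Int → List Bool → List (Int × Int) → List Int
  | 0, res, _, _ => res
  | fuel+1, res, added, ivs =>
      if (res.length : Int) < n then
        let st := ivs.foldl (pvStep n) (res, added, ([] : List (Int × Int)))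
        if st.2.2 = [] then st.1 else pvLoop n fuel st.1 st.2.1 st.2.2
      else res

def spread_indices_py (n : Int) : List Int :=
  if n ≤ 0 then []
  else if n = 1 then [0]
  else
    let added0 : List Bool := List.replicate n.toNat false
    let s1 := pvAdd n 0 [] added0
    let s2 := pvAdd n (n - 1) s1.1 s1.2
    pvLoop n n.toNat s2.1 s2.2 [(0, n - 1)]

-- ===== PORT B =====
-- `_layer(lo, hi, k)`: the midpoints at recursion depth k inside (lo, hi)
def pvLayer (lo hi : Int) (k : Int) : List Int :=
  if h2w : 2 ≤ hi - lo then  -- h2w is used by the decreasing_by proof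
    if k = 0 then [pvMid lo hi]
    else pvLayer lo (pvMid lo hi) (k - 1) ++ pvLayer (pvMid lo hi) hi (k - 1)
  else []
termination_by (hi - lo).toNat
decreasing_by
  · have := pv_mid_bounds lo hi h2w; omega
  · have := pv_mid_bounds lo hi h2w; omega

-- the `while i < n` loop: write each level's midpoints at out[i], out[i+1], …;
-- fuel n.toNat is spent one unit per level and is proved sufficient (pvFill_eq below)
def pvFill (n : Int) : Nat → Int → Int → List Int → List Int
  | 0, _, _, out => out
  | fuel+1, i, k, out =>
      if i < n then
        let st := (pvLayer 0 (n - 1) k).foldl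
          (fun (st : Int × List Int) m => (st.1 + 1, st.2.set st.1.toNat m)) (i, out)
        pvFill n fuel st.1 (k + 1) st.2
      else out

def spread_indices_py_alt (n : Int) : List Int :=
  if n ≤ 0 then []
  else if n = 1 then [0]
  else
    -- out = [0] * n; out[1] = n - 1 (index 1 is in range since n ≥ 2)
    let out0 := (List.replicate n.toNat 0).set 1 (n - 1)
    pvFill n n.toNat 2 0 out0

-- ===== PRECONDITION & SPEC =====
def Spec_spread_indices_py (n : Int) (out : List Int) : Prop := out = spread_indices_py_alt n
instance (n : Int) (out : List Int) : Decidable (Spec_spread_indices_py n out) := by unfold Spec_spread_indices_py; infer_instance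

-- ===== CLAIM (what is proved, stated in full; the proofs are below) =====
def Claim_equal_spread_indices_py : Prop := ∀ (n : Int), Dom_spread_indices_py n → Spec_spread_indices_py n (spread_indices_py n)

-- ===== LEMMAS AND PROOFS =====

-- midpoints that appear at recursion depth k inside interval (lo, hi)
def layerF : Nat → Int → Int → List Int
  | 0, lo, hi => if 2 ≤ hi - lo then [pvMid lo hi] else []
  | k+1, lo, hi =>
      if 2 ≤ hi - lo then layerF k lo (pvMid lo hi) ++ layerF k (pvMid lo hi) hi else []

-- the two sub-intervals a wide interval contributes to next_intervals
def childrenF (iv : Int × Int) : List (Int × Int) :=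
  if 2 ≤ iv.2 - iv.1 then [(iv.1, pvMid iv.1 iv.2), (pvMid iv.1 iv.2, iv.2)] else []

-- all midpoints of `ivs`, level by level, K levels
def tgtT (K : Nat) (ivs : List (Int × Int)) : List Int :=
  (List.range K).flatMap (fun k => ivs.flatMap (fun iv => layerF k iv.1 iv.2))

def inIv (iv : Int × Int) (i : Int) : Prop := iv.1 < i ∧ i < iv.2

def ivDisj (a b : Int × Int) : Prop := ∀ i, inIv a i → ¬ inIv b i

def pvBounds (n : Int) (iv : Int × Int) : Prop := 0 ≤ iv.1 ∧ iv.1 < iv.2 ∧ iv.2 < n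

def sumI (ivs : List (Int × Int)) : Int := (ivs.map (fun iv => iv.2 - iv.1 - 1)).sum

-- ---- B side ----

theorem layerF_zero (lo hi : Int) :
    layerF 0 lo hi = if 2 ≤ hi - lo then [pvMid lo hi] else [] := rfl

theorem layerF_succ (k : Nat) (lo hi : Int) :
    layerF (k+1) lo hi =
      if 2 ≤ hi - lo then layerF k lo (pvMid lo hi) ++ layerF k (pvMid lo hi) hi else [] := rfl

-- ---- A side ----

theorem children_bounds (n : Int) (iv : Int × Int) (hb : pvBounds n iv) :
    ∀ jv ∈ childrenF iv, pvBounds n jv := by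
  intro jv hjv
  unfold childrenF at hjv
  split at hjv
  · rename_i h
    have hm := pv_mid_bounds iv.1 iv.2 h
    obtain ⟨hb1, hb2, hb3⟩ := hb
    simp only [List.mem_cons, List.not_mem_nil, or_false] at hjv
    rcases hjv with rfl | rfl <;> exact ⟨by omega, by omega, by omega⟩
  · simp at hjv

theorem layer_succ (k : Nat) (iv : Int × Int) :
    layerF (k+1) iv.1 iv.2 = (childrenF iv).flatMap (fun jv => layerF k jv.1 jv.2) := by
  by_cases h : 2 ≤ iv.2 - iv.1 <;> simp [layerF, childrenF, h]

theorem layer_empty (k : Nat) (lo hi : Int) (h : ¬ 2 ≤ hi - lo) : layerF k lo hi = [] := by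
  cases k <;> simp [layerF, h]

theorem sumI_append (l1 l2 : List (Int × Int)) : sumI (l1 ++ l2) = sumI l1 + sumI l2 := by
  simp [sumI]

theorem tgt_step (K : Nat) (ivs : List (Int × Int)) :
    tgtT (K+1) ivs =
      ivs.flatMap (fun iv => layerF 0 iv.1 iv.2) ++ tgtT K (ivs.flatMap childrenF) := by
  unfold tgtT
  rw [List.range_succ_eq_map]
  simp only [List.flatMap_cons, List.flatMap_map]
  congr 1
  apply List.flatMap_congr
  intro k _
  rw [List.flatMap_assoc]
  apply List.flatMap_congr
  intro iv _
  exact layer_succ k iv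

theorem sum_split (n : Int) (ivs : List (Int × Int)) (hb : ∀ iv ∈ ivs, pvBounds n iv) :
    ((ivs.flatMap (fun iv => layerF 0 iv.1 iv.2)).length : Int) +
      sumI (ivs.flatMap childrenF) = sumI ivs := by
  induction ivs with
  | nil => simp [sumI]
  | cons iv tl ih =>
    have hiv := hb iv (by simp)
    have htl := ih (fun x hx => hb x (List.mem_cons_of_mem _ hx))
    obtain ⟨hb1, hb2, hb3⟩ := hiv
    have h1 : ((layerF 0 iv.1 iv.2).length : Int) + sumI (childrenF iv) =
        iv.2 - iv.1 - 1 := by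
      by_cases h : 2 ≤ iv.2 - iv.1
      · have hm := pv_mid_bounds iv.1 iv.2 h
        simp [layerF, childrenF, h, sumI]
        ring
      · simp [layerF, childrenF, h, sumI]
        omega
    have hcons : sumI (iv :: tl) = iv.2 - iv.1 - 1 + sumI tl := by simp [sumI]
    rw [List.flatMap_cons, List.flatMap_cons, sumI_append, hcons, List.length_append]
    push_cast
    omega

theorem getD_set_ne (l : List Bool) (x : Bool) (a b : Nat) (h : a ≠ b) :
    (l.set a x).getD b true = l.getD b true := by
  rw [List.getD_eq_getElem?_getD, List.getD_eq_getElem?_getD, List.getElem?_set_ne h]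

theorem fold_level (n : Int) : ∀ (ivs : List (Int × Int)) (res : List Int)
    (added : List Bool) (next0 : List (Int × Int)),
    (∀ iv ∈ ivs, pvBounds n iv) →
    (∀ iv ∈ ivs, ∀ i, inIv iv i → added.getD i.toNat true = false) →
    ivs.Pairwise ivDisj →
    (∀ jv ∈ next0, ∀ i, inIv jv i → added.getD i.toNat true = false) →
    (∀ jv ∈ next0, ∀ iv ∈ ivs, ivDisj jv iv) →
    next0.Pairwise ivDisj →
    ∃ added',
      ivs.foldl (pvStep n) (res, added, next0) =
        (res ++ ivs.flatMap (fun iv => layerF 0 iv.1 iv.2), added',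
          next0 ++ ivs.flatMap childrenF) ∧
      (∀ jv ∈ next0 ++ ivs.flatMap childrenF, ∀ i, inIv jv i →
        added'.getD i.toNat true = false) ∧
      (next0 ++ ivs.flatMap childrenF).Pairwise ivDisj := by
  intro ivs
  induction ivs with
  | nil =>
    intro res added next0 _ _ _ hn1 _ hn3
    exact ⟨added, by simp, by simpa using hn1, by simpa using hn3⟩
  | cons iv tl ih =>
    intro res added next0 hbA hcA hpA hn1 hn2 hn3
    have hbiv := hbA iv (by simp)
    obtain ⟨hb1, hb2, hb3⟩ := hbiv
    have hpA' := List.pairwise_cons.mp hpA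
    rw [List.foldl_cons]
    by_cases hw : iv.2 - iv.1 ≤ 1
    · have hl0 : layerF 0 iv.1 iv.2 = [] := layer_empty 0 iv.1 iv.2 (by omega)
      have hch : childrenF iv = [] := by unfold childrenF; rw [if_neg (by omega)]
      have hstep : pvStep n (res, added, next0) iv = (res, added, next0) := by
        unfold pvStep; rw [if_pos hw]
      rw [hstep]
      obtain ⟨added', heq, h1, h2⟩ :=
        ih res added next0 (fun x hx => hbA x (by simp [hx]))
          (fun x hx => hcA x (by simp [hx])) hpA'.2
          hn1 (fun jv hjv x hx => hn2 jv hjv x (by simp [hx])) hn3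
      exact ⟨added', by simpa [hl0, hch] using heq, by simpa [hch] using h1,
        by simpa [hch] using h2⟩
    · have hw2 : 2 ≤ iv.2 - iv.1 := by omega
      have hm := pv_mid_bounds iv.1 iv.2 hw2
      set m := pvMid iv.1 iv.2 with hmdef
      have hmiv : inIv iv m := ⟨by omega, by omega⟩
      have hguard : 0 ≤ m ∧ m < n ∧ added.getD m.toNat true = false :=
        ⟨by omega, by omega, hcA iv (by simp) m hmiv⟩
      have hl0 : layerF 0 iv.1 iv.2 = [m] := by unfold layerF; rw [if_pos hw2]
      have hch : childrenF iv = [(iv.1, m), (m, iv.2)] := by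
        unfold childrenF; rw [if_pos hw2]
      have hstep : pvStep n (res, added, next0) iv =
          (res ++ [m], added.set m.toNat true, next0 ++ [(iv.1, m), (m, iv.2)]) := by
        unfold pvStep
        rw [if_neg hw]
        simp only [← hmdef]
        unfold pvAdd
        rw [if_pos ⟨hguard.1, hguard.2.1, hguard.2.2⟩]
      rw [hstep]
      -- i ≠ m implies the set does not change the flag at i (for nonnegative i)
      have hset : ∀ i : Int, i ≠ m →
          (added.set m.toNat true).getD i.toNat true = added.getD i.toNat true := by
        intro i hne
        exact getD_set_ne added true m.toNat i.toNat (by omega)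
      obtain ⟨added', heq, h1, h2⟩ :=
        ih (res ++ [m]) (added.set m.toNat true) (next0 ++ [(iv.1, m), (m, iv.2)])
          (fun x hx => hbA x (by simp [hx]))
          (by
            intro iv' hiv' i hi
            have hdisj := hpA'.1 iv' hiv'
            have hnem : i ≠ m := fun h => hdisj m hmiv (h ▸ hi)
            rw [hset i hnem]
            exact hcA iv' (by simp [hiv']) i hi)
          hpA'.2
          (by
            intro jv hjv i hi
            rcases List.mem_append.mp hjv with hjv | hjv
            · have hnem : i ≠ m := fun h => hn2 jv hjv iv (by simp) i (h ▸ hi) (h ▸ hmiv)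
              rw [hset i hnem]
              exact hn1 jv hjv i hi
            · simp only [List.mem_cons, List.not_mem_nil, or_false] at hjv
              rcases hjv with rfl | rfl
              · obtain ⟨a, b⟩ := hi
                rw [hset i (by omega)]
                exact hcA iv (by simp) i ⟨by omega, by omega⟩
              · obtain ⟨a, b⟩ := hi
                rw [hset i (by omega)]
                exact hcA iv (by simp) i ⟨by omega, by omega⟩)
          (by
            intro jv hjv iv' hiv'
            rcases List.mem_append.mp hjv with hjv | hjv
            · exact hn2 jv hjv iv' (by simp [hiv'])
            · simp only [List.mem_cons, List.not_mem_nil, or_false] at hjv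
              intro i hi hiv'i
              have hiviv : inIv iv i := by
                rcases hjv with rfl | rfl
                · obtain ⟨a, b⟩ := hi; exact ⟨by omega, by omega⟩
                · obtain ⟨a, b⟩ := hi; exact ⟨by omega, by omega⟩
              exact hpA'.1 iv' hiv' i hiviv hiv'i)
          (by
            rw [List.pairwise_append]
            refine ⟨hn3, ?_, ?_⟩
            · constructor
              · intro jv hjv
                simp only [List.mem_cons, List.not_mem_nil, or_false] at hjv
                subst hjv
                intro i hi1 hi2
                obtain ⟨a, b⟩ := hi1; obtain ⟨c, d⟩ := hi2
                omega
              · constructor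
                · intro jv hjv; simp at hjv
                · constructor
            · intro jv hjv c hc
              simp only [List.mem_cons, List.not_mem_nil, or_false] at hc
              intro i hi hci
              have hiviv : inIv iv i := by
                rcases hc with rfl | rfl
                · obtain ⟨a, b⟩ := hci; exact ⟨by omega, by omega⟩
                · obtain ⟨a, b⟩ := hci; exact ⟨by omega, by omega⟩
              exact hn2 jv hjv iv (by simp) i hi hiviv)
      refine ⟨added', ?_, ?_, ?_⟩
      · rw [heq, List.flatMap_cons, List.flatMap_cons, hl0, hch]
        simp [List.append_assoc]
      · intro jv hjv
        apply h1
        rw [List.flatMap_cons, hch] at hjv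
        simpa [List.append_assoc] using hjv
      · rw [List.flatMap_cons, hch]
        have := h2
        simpa [List.append_assoc] using this


theorem sumI_nonneg (n : Int) : ∀ (ivs : List (Int × Int)), (∀ iv ∈ ivs, pvBounds n iv) →
    0 ≤ sumI ivs := by
  intro ivs
  induction ivs with
  | nil => intro _; simp [sumI]
  | cons iv tl ih =>
    intro hb
    have h1 := (hb iv (by simp)).2.1
    have h2 := ih (fun x hx => hb x (by simp [hx]))
    have : sumI (iv :: tl) = iv.2 - iv.1 - 1 + sumI tl := by simp [sumI]
    omega

theorem sumI_zero_of_narrow : ∀ (ivs : List (Int × Int)),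
    (∀ iv ∈ ivs, iv.2 - iv.1 = 1) → sumI ivs = 0 := by
  intro ivs
  induction ivs with
  | nil => intro _; simp [sumI]
  | cons iv tl ih =>
    intro hb
    have h1 := hb iv (by simp)
    have h2 := ih (fun x hx => hb x (by simp [hx]))
    have : sumI (iv :: tl) = iv.2 - iv.1 - 1 + sumI tl := by simp [sumI]
    omega

theorem sumI_ge_one (n : Int) : ∀ (ivs : List (Int × Int)), (∀ iv ∈ ivs, pvBounds n iv) →
    ∀ iv ∈ ivs, 2 ≤ iv.2 - iv.1 → 1 ≤ sumI ivs := by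
  intro ivs
  induction ivs with
  | nil => intro _ iv h; simp at h
  | cons a tl ih =>
    intro hb iv hmem hw
    have hs : sumI (a :: tl) = a.2 - a.1 - 1 + sumI tl := by simp [sumI]
    have htl0 := sumI_nonneg n tl (fun x hx => hb x (by simp [hx]))
    have ha := (hb a (by simp)).2.1
    rcases List.mem_cons.mp hmem with rfl | hmem
    · omega
    · have := ih (fun x hx => hb x (by simp [hx])) iv hmem hw
      omega

theorem tgt_empty (K : Nat) : ∀ (ivs : List (Int × Int)),
    (∀ iv ∈ ivs, ¬ 2 ≤ iv.2 - iv.1) → tgtT K ivs = [] := by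
  intro ivs h
  unfold tgtT
  apply List.flatMap_eq_nil_iff.mpr
  intro k _
  apply List.flatMap_eq_nil_iff.mpr
  intro iv hiv
  exact layer_empty k iv.1 iv.2 (h iv hiv)

theorem pv_loop_eq (n : Int) : ∀ (fuel : Nat) (ivs : List (Int × Int)) (res : List Int)
    (added : List Bool),
    (∀ iv ∈ ivs, pvBounds n iv) →
    (∀ iv ∈ ivs, ∀ i, inIv iv i → added.getD i.toNat true = false) →
    ivs.Pairwise ivDisj →
    (res.length : Int) + sumI ivs = n →
    sumI ivs ≤ (fuel : Int) →
    pvLoop n fuel res added ivs = res ++ tgtT fuel ivs := by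
  intro fuel
  induction fuel with
  | zero => intro ivs res added _ _ _ _ _; simp [pvLoop, tgtT]
  | succ fuel ih =>
    intro ivs res added hb hc hp hlen hfuel
    by_cases hz : sumI ivs ≤ 0
    · -- no wide interval: the while test fails at once and no midpoints remain
      have hz0 : sumI ivs = 0 := le_antisymm hz (sumI_nonneg n ivs hb)
      have hnarrow : ∀ iv ∈ ivs, ¬ 2 ≤ iv.2 - iv.1 := by
        intro iv hiv hw
        have := sumI_ge_one n ivs hb iv hiv hw
        omega
      rw [pvLoop]
      rw [if_neg (by omega)]
      rw [tgt_empty (fuel+1) ivs hnarrow, List.append_nil]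
    · rw [not_le] at hz
      have hwide : ∃ iv ∈ ivs, 2 ≤ iv.2 - iv.1 := by
        by_contra hcon
        rw [not_exists] at hcon; simp only [not_and, not_le] at hcon
        have : ∀ iv ∈ ivs, iv.2 - iv.1 = 1 := by
          intro iv hiv
          have := (hb iv hiv).2.1
          have := hcon iv hiv
          omega
        have := sumI_zero_of_narrow ivs this
        omega
      obtain ⟨ivw, hivw, hww⟩ := hwide
      obtain ⟨added', heq, h1, h2⟩ :=
        fold_level n ivs res added [] hb hc hp (by simp) (by simp) (by simp)
      rw [pvLoop, if_pos (by omega)]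
      simp only [heq, List.nil_append]
      have hCne : ivs.flatMap childrenF ≠ [] := by
        intro hnil
        have hmem : (ivw.1, pvMid ivw.1 ivw.2) ∈ ivs.flatMap childrenF := by
          apply List.mem_flatMap.mpr
          exact ⟨ivw, hivw, by unfold childrenF; rw [if_pos hww]; simp⟩
        rw [hnil] at hmem
        simp at hmem
      rw [if_neg hCne]
      have hMne : ivs.flatMap (fun iv => layerF 0 iv.1 iv.2) ≠ [] := by
        intro hnil
        have hmem : pvMid ivw.1 ivw.2 ∈ ivs.flatMap (fun iv => layerF 0 iv.1 iv.2) := by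
          apply List.mem_flatMap.mpr
          exact ⟨ivw, hivw, by unfold layerF; rw [if_pos hww]; simp⟩
        rw [hnil] at hmem
        simp at hmem
      have hsplit := sum_split n ivs hb
      have hM1 : 1 ≤ ((ivs.flatMap (fun iv => layerF 0 iv.1 iv.2)).length : Int) := by
        have := List.length_pos_iff.mpr hMne
        omega
      rw [ih (ivs.flatMap childrenF) (res ++ ivs.flatMap (fun iv => layerF 0 iv.1 iv.2)) added'
        (by
          intro jv hjv
          obtain ⟨iv, hiv, hjv2⟩ := List.mem_flatMap.mp hjv
          exact children_bounds n iv (hb iv hiv) jv hjv2)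
        (by simpa using h1)
        (by simpa using h2)
        (by
          rw [List.length_append]
          push_cast
          omega)
        (by omega)]
      rw [tgt_step fuel ivs, List.append_assoc]

-- ---- assembling B ----

theorem pvLayer_eq : ∀ (k : Nat) (lo hi : Int), pvLayer lo hi (k : Int) = layerF k lo hi := by
  intro k
  induction k with
  | zero =>
    intro lo hi
    by_cases h : 2 ≤ hi - lo
    · rw [pvLayer, dif_pos h, if_pos (by norm_num), layerF_zero, if_pos h]
    · rw [pvLayer, dif_neg h, layerF_zero, if_neg h]
  | succ k ih =>
    intro lo hi
    by_cases h : 2 ≤ hi - lo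
    · rw [pvLayer, dif_pos h, if_neg (by push_cast; omega)]
      have hc : ((k + 1 : Nat) : Int) - 1 = (k : Int) := by push_cast; ring
      rw [hc, ih, ih, layerF_succ, if_pos h]
    · rw [pvLayer, dif_neg h, layer_empty (k+1) lo hi h]

theorem layer_mono : ∀ (k : Nat) (lo hi : Int), layerF k lo hi = [] → layerF (k+1) lo hi = [] := by
  intro k
  induction k with
  | zero =>
    intro lo hi h
    by_cases hw : 2 ≤ hi - lo
    · rw [layerF_zero, if_pos hw] at h
      simp at h
    · exact layer_empty 1 lo hi hw
  | succ k ih =>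
    intro lo hi h
    by_cases hw : 2 ≤ hi - lo
    · rw [layerF_succ, if_pos hw] at h
      rw [layerF_succ, if_pos hw]
      rcases List.append_eq_nil_iff.mp h with ⟨h1, h2⟩
      rw [ih _ _ h1, ih _ _ h2]
      simp
    · exact layer_empty (k+2) lo hi hw

theorem layer_mono_ge (k : Nat) (lo hi : Int) (h : layerF k lo hi = []) :
    ∀ j, k ≤ j → layerF j lo hi = [] := by
  intro j hj
  induction j, hj using Nat.le_induction with
  | base => exact h
  | succ j hj ih => exact layer_mono j lo hi ih

theorem tgt_snoc (k : Nat) (l : List (Int × Int)) :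
    tgtT (k+1) l = tgtT k l ++ l.flatMap (fun iv => layerF k iv.1 iv.2) := by
  unfold tgtT
  rw [List.range_succ, List.flatMap_append, List.flatMap_singleton]

theorem tgt_split (k K : Nat) (hk : k ≤ K) (l : List (Int × Int)) :
    tgtT K l = tgtT k l ++
      (List.range' k (K - k)).flatMap (fun j => l.flatMap (fun iv => layerF j iv.1 iv.2)) := by
  unfold tgtT
  have hr : List.range K = List.range k ++ List.range' k (K - k) := by
    rw [List.range_eq_range', List.range_eq_range']
    rw [show K = k + (K - k) by omega, ← List.range'_append_1]
    norm_num
  rw [hr, List.flatMap_append]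

theorem tgt_len (n : Int) : ∀ (fuel : Nat) (ivs : List (Int × Int)),
    (∀ iv ∈ ivs, pvBounds n iv) → sumI ivs ≤ (fuel : Int) →
    ((tgtT fuel ivs).length : Int) = sumI ivs := by
  intro fuel
  induction fuel with
  | zero =>
    intro ivs hb hf
    have := sumI_nonneg n ivs hb
    simp [tgtT]
    omega
  | succ fuel ih =>
    intro ivs hb hf
    by_cases hz : sumI ivs ≤ 0
    · have hz0 : sumI ivs = 0 := le_antisymm hz (sumI_nonneg n ivs hb)
      have hnarrow : ∀ iv ∈ ivs, ¬ 2 ≤ iv.2 - iv.1 := by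
        intro iv hiv hw
        have := sumI_ge_one n ivs hb iv hiv hw
        omega
      rw [tgt_empty (fuel+1) ivs hnarrow]
      simpa using hz0.symm
    · rw [not_le] at hz
      have hcb : ∀ jv ∈ ivs.flatMap childrenF, pvBounds n jv := by
        intro jv hjv
        obtain ⟨iv, hiv, hjv2⟩ := List.mem_flatMap.mp hjv
        exact children_bounds n iv (hb iv hiv) jv hjv2
      have hwide : ∃ iv ∈ ivs, 2 ≤ iv.2 - iv.1 := by
        by_contra hcon
        rw [not_exists] at hcon
        simp only [not_and, not_le] at hcon
        have : ∀ iv ∈ ivs, iv.2 - iv.1 = 1 := by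
          intro iv hiv
          have := (hb iv hiv).2.1
          have := hcon iv hiv
          omega
        have := sumI_zero_of_narrow ivs this
        omega
      obtain ⟨ivw, hivw, hww⟩ := hwide
      have hMne : ivs.flatMap (fun iv => layerF 0 iv.1 iv.2) ≠ [] := by
        intro hnil
        have hmem : pvMid ivw.1 ivw.2 ∈ ivs.flatMap (fun iv => layerF 0 iv.1 iv.2) := by
          apply List.mem_flatMap.mpr
          exact ⟨ivw, hivw, by rw [layerF_zero, if_pos hww]; simp⟩
        rw [hnil] at hmem
        simp at hmem
      have hsplit := sum_split n ivs hb
      have hM1 : 1 ≤ ((ivs.flatMap (fun iv => layerF 0 iv.1 iv.2)).length : Int) := by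
        have := List.length_pos_iff.mpr hMne
        omega
      rw [tgt_step fuel ivs, List.length_append]
      have := ih (ivs.flatMap childrenF) hcb (by omega)
      omega

-- writing vs at positions pre.length, pre.length+1, … of pre ++ rest
theorem set_len_append : ∀ (pre : List Int) (r : Int) (rest : List Int) (m : Int),
    (pre ++ r :: rest).set pre.length m = pre ++ m :: rest := by
  intro pre
  induction pre with
  | nil => intro r rest m; rfl
  | cons a pre ih => intro r rest m; simp [ih]

theorem fill_foldl : ∀ (vs pre rest : List Int), vs.length ≤ rest.length →
    vs.foldl (fun (st : Int × List Int) m => (st.1 + 1, st.2.set st.1.toNat m))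
        ((pre.length : Int), pre ++ rest) =
      ((pre.length : Int) + vs.length, (pre ++ vs) ++ rest.drop vs.length) := by
  intro vs
  induction vs with
  | nil => intro pre rest _; simp
  | cons m vs ih =>
    intro pre rest hlen
    cases rest with
    | nil => simp at hlen
    | cons r rest =>
      rw [List.foldl_cons]
      show List.foldl _ ((pre.length : Int) + 1,
        (pre ++ r :: rest).set ((pre.length : Int)).toNat m) vs = _
      rw [Int.toNat_natCast, set_len_append pre r rest m]
      have e1 : (pre.length : Int) + 1 = ((pre ++ [m]).length : Int) := by simp
      have e2 : pre ++ m :: rest = (pre ++ [m]) ++ rest := by simp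
      rw [e1, e2, ih (pre ++ [m]) rest (by simp at hlen ⊢; omega)]
      simp only [Prod.mk.injEq]
      constructor
      · simp
        ring
      · simp

theorem pvFill_eq (n : Int) (h2 : 2 ≤ n) : ∀ (fuel kn : Nat),
    kn ≤ n.toNat →
    n - (2 + ((tgtT kn [(0, n - 1)]).length : Int)) ≤ (fuel : Int) →
    pvFill n fuel (2 + ((tgtT kn [(0, n - 1)]).length : Int)) (kn : Int)
        ([0, n - 1] ++ tgtT kn [(0, n - 1)] ++
          List.replicate (n.toNat - 2 - (tgtT kn [(0, n - 1)]).length) 0) =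
      [0, n - 1] ++ tgtT n.toNat [(0, n - 1)] := by
  have hbs : ∀ iv ∈ [((0 : Int), n - 1)], pvBounds n iv := by
    intro iv hiv
    simp only [List.mem_singleton] at hiv
    subst hiv
    exact ⟨le_refl 0, by omega, by omega⟩
  have htot : ((tgtT n.toNat [((0 : Int), n - 1)]).length : Int) = n - 2 := by
    rw [tgt_len n n.toNat _ hbs (by simp [sumI]; omega)]
    simp [sumI]
    omega
  intro fuel
  induction fuel with
  | zero =>
    intro kn hk hf
    obtain ⟨S, hS⟩ : ∃ S, tgtT n.toNat [((0:Int), n - 1)] = tgtT kn [((0:Int), n - 1)] ++ S :=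
      ⟨_, tgt_split kn n.toNat hk _⟩
    have hSlen := congrArg List.length hS
    simp only [List.length_append] at hSlen
    have hSnil : S = [] := by
      have : S.length = 0 := by omega
      exact List.eq_nil_of_length_eq_zero this
    rw [pvFill, hS, hSnil, List.append_nil]
    have hz : n.toNat - 2 - (tgtT kn [((0:Int), n - 1)]).length = 0 := by omega
    rw [hz]
    simp
  | succ fuel ih =>
    intro kn hk hf
    by_cases hi : 2 + ((tgtT kn [((0:Int), n - 1)]).length : Int) < n
    · -- the current layer is nonempty; write it and continue with level kn+1
      have hkK : kn < n.toNat := by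
        rcases Nat.lt_or_ge kn n.toNat with h | h
        · exact h
        · exfalso
          have : kn = n.toNat := by omega
          subst this
          omega
      have hWL : tgtT (kn+1) [((0:Int), n - 1)] =
          tgtT kn [((0:Int), n - 1)] ++ layerF kn 0 (n - 1) := by
        rw [tgt_snoc]
        simp
      obtain ⟨S, hS⟩ : ∃ S, tgtT n.toNat [((0:Int), n - 1)] =
          tgtT (kn+1) [((0:Int), n - 1)] ++ S := ⟨_, tgt_split (kn+1) n.toNat hkK _⟩
      have hLne : layerF kn 0 (n - 1) ≠ [] := by
        intro hnil
        have hSnil : S = [] := by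
          have hSin : S = (List.range' (kn+1) (n.toNat - (kn+1))).flatMap
              (fun j => [((0:Int), n - 1)].flatMap (fun iv => layerF j iv.1 iv.2)) := by
            have h1 := tgt_split (kn+1) n.toNat hkK [((0:Int), n - 1)]
            rw [h1] at hS
            exact (List.append_cancel_left hS).symm
          rw [hSin]
          apply List.flatMap_eq_nil_iff.mpr
          intro j hj
          have hjge : kn + 1 ≤ j := (List.mem_range'_1.mp hj).1
          simp only [List.flatMap_cons, List.flatMap_nil, List.append_nil]
          exact layer_mono_ge kn 0 (n - 1) hnil j (by omega)
        have hlen := congrArg List.length hS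
        rw [hSnil, hWL, hnil] at hlen
        simp only [List.append_nil] at hlen
        omega
      have hL1 : 1 ≤ ((layerF kn 0 (n - 1)).length : Int) := by
        have := List.length_pos_iff.mpr hLne
        omega
      have hlen1 : ((tgtT (kn+1) [((0:Int), n - 1)]).length : Int) ≤ n - 2 := by
        have := congrArg List.length hS
        simp only [List.length_append] at this
        omega
      have hWlen : ((tgtT kn [((0:Int), n - 1)]).length : Int) +
          ((layerF kn 0 (n - 1)).length : Int) ≤ n - 2 := by
        rw [hWL] at hlen1
        simp only [List.length_append] at hlen1
        push_cast at hlen1 ⊢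
        omega
      rw [pvFill, if_pos hi]
      have hrest : (layerF kn 0 (n - 1)).length ≤
          (List.replicate (n.toNat - 2 - (tgtT kn [((0:Int), n - 1)]).length) (0:Int)).length := by
        simp only [List.length_replicate]
        push_cast at hWlen ⊢
        omega
      have hpre : (2 : Int) + ((tgtT kn [((0:Int), n - 1)]).length : Int) =
          ((([0, n - 1] ++ tgtT kn [((0:Int), n - 1)]).length : Nat) : Int) := by
        simp
        ring
      have hfold := fill_foldl (layerF kn 0 (n - 1))
        ([0, n - 1] ++ tgtT kn [((0:Int), n - 1)])
        (List.replicate (n.toNat - 2 - (tgtT kn [((0:Int), n - 1)]).length) 0) hrest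
      simp only [pvLayer_eq, List.append_assoc] at hfold ⊢
      rw [hpre, hfold, List.drop_replicate]
      have hc1 : ((kn : Int) + 1) = ((kn + 1 : Nat) : Int) := by push_cast; ring
      have hc2 : ((([0, n - 1] ++ (tgtT kn [((0:Int), n - 1)] ++ List.replicate 0 0)).length : Nat) : Int) +
          ((layerF kn 0 (n - 1)).length : Int) =
          2 + ((tgtT (kn+1) [((0:Int), n - 1)]).length : Int) := by
        rw [hWL]
        simp
        ring
      have goal := ih (kn + 1) (by omega)
        (by rw [hWL]; simp only [List.length_append]; omega)
      rw [hc1]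
      rw [show ((([0, n - 1] ++ tgtT kn [((0:Int), n - 1)]).length : Nat) : Int) +
            ((layerF kn 0 (n - 1)).length : Int) =
          2 + ((tgtT (kn+1) [((0:Int), n - 1)]).length : Int) by
        rw [hWL]; simp; ring]
      have hrepeq : n.toNat - 2 - (tgtT kn [((0:Int), n - 1)]).length -
            (layerF kn 0 (n - 1)).length =
          n.toNat - 2 - (tgtT (kn+1) [((0:Int), n - 1)]).length := by
        rw [hWL]
        simp only [List.length_append]
        omega
      rw [hrepeq, ← List.append_assoc (tgtT kn [((0:Int), n - 1)]) (layerF kn 0 (n - 1)), ← hWL]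
      simpa [List.append_assoc] using goal
    · -- i ≥ n: every midpoint is already written
      obtain ⟨S, hS⟩ : ∃ S, tgtT n.toNat [((0:Int), n - 1)] = tgtT kn [((0:Int), n - 1)] ++ S :=
        ⟨_, tgt_split kn n.toNat hk _⟩
      have hSlen := congrArg List.length hS
      simp only [List.length_append] at hSlen
      have hSnil : S = [] := by
        have : S.length = 0 := by push_cast at hSlen htot hi ⊢; omega
        exact List.eq_nil_of_length_eq_zero this
      rw [pvFill, if_neg hi, hS, hSnil, List.append_nil]
      have hz : n.toNat - 2 - (tgtT kn [((0:Int), n - 1)]).length = 0 := by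
        push_cast at hSlen htot hi ⊢
        omega
      rw [hz]
      simp

theorem alt_eq (n : Int) (h2 : 2 ≤ n) :
    spread_indices_py_alt n = [0, n - 1] ++ tgtT n.toNat [(0, n - 1)] := by
  unfold spread_indices_py_alt
  rw [if_neg (by omega), if_neg (by omega)]
  have hrep : (List.replicate n.toNat (0:Int)).set 1 (n - 1) =
      [0, n - 1] ++ List.replicate (n.toNat - 2) 0 := by
    obtain ⟨z, hz⟩ : ∃ z, n.toNat = z + 2 := ⟨n.toNat - 2, by omega⟩
    rw [hz]
    simp [List.replicate_succ]
  simp only [hrep]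
  have := pvFill_eq n h2 n.toNat 0 (by omega) (by simp [tgtT]; try omega)
  simpa [tgtT] using this

-- ===== VERDICT (by name: the statement is the Claim_ definition above) =====
theorem spread_indices_py_spec : Claim_equal_spread_indices_py := by
  intro n _
  unfold Spec_spread_indices_py
  by_cases h0 : n ≤ 0
  · unfold spread_indices_py spread_indices_py_alt
    rw [if_pos h0, if_pos h0]
  · by_cases h1 : n = 1
    · unfold spread_indices_py spread_indices_py_alt
      rw [if_neg h0, if_neg h0, if_pos h1, if_pos h1]
    · have h2 : 2 ≤ n := by omega
      have hrep : ∀ i : Nat, i < n.toNat →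
          (List.replicate n.toNat false).getD i true = false := by
        intro i hi
        rw [List.getD_eq_getElem?_getD, List.getElem?_replicate, if_pos hi]
        rfl
      have hA1 : pvAdd n 0 [] (List.replicate n.toNat false) =
          ([0], (List.replicate n.toNat false).set 0 true) := by
        unfold pvAdd
        rw [if_pos ⟨le_refl 0, by omega, by simpa using hrep 0 (by omega)⟩]
        rfl
      have hA2 : pvAdd n (n - 1) [0] ((List.replicate n.toNat false).set 0 true) =
          ([0, n - 1], ((List.replicate n.toNat false).set 0 true).set (n-1).toNat true) := by
        unfold pvAdd
        rw [if_pos ⟨by omega, by omega, by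
          rw [getD_set_ne _ _ _ _ (by omega)]
          exact hrep (n-1).toNat (by omega)⟩]
        rfl
      unfold spread_indices_py
      rw [if_neg h0, if_neg h1]
      simp only [hA1, hA2]
      rw [pv_loop_eq n n.toNat [(0, n - 1)] [0, n - 1]
        (((List.replicate n.toNat false).set 0 true).set (n-1).toNat true)
        (by
          intro iv hiv
          simp only [List.mem_singleton] at hiv
          subst hiv
          exact ⟨le_refl 0, by omega, by omega⟩)
        (by
          intro iv hiv i hi
          simp only [List.mem_singleton] at hiv
          subst hiv
          obtain ⟨ha, hb⟩ := hi
          rw [getD_set_ne _ _ _ _ (by omega), getD_set_ne _ _ _ _ (by omega)]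
          exact hrep i.toNat (by omega))
        (by simp)
        (by simp [sumI]; omega)
        (by simp [sumI]; omega)]
      exact (alt_eq n h2).symm
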